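-- pv_equiv track=rewrite | github.com/Joeysdi/fddf | playback.py | skip_to_else_or_end_if
-- ===== SOURCE A (Python) =====
-- def skip_to_else_or_end_if(script, i):
--     depth = 1
--     i += 1
--     while i < len(script):
--         if script[i]["type"] in ["if_pixel", "if_multi_pixel", "if_text_contains", "if_number_compare",
--                                  "wait_for_pixel", "wait_for_multi_pixel", "wait_for_text", "wait_for_number"]:
--             depth += 1
--         elif script[i]["type"] == "else" and depth == 1:
--             return i + 1
--         elif script[i]["type"] == "end_if" and depth == 1:
--             return i + 1
--         elif script[i]["type"] == "end_if":
--             depth -= 1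
--         i += 1
--     return i
-- ===== SOURCE B (Python) =====
-- _OPENERS = ("if_pixel", "if_multi_pixel", "if_text_contains", "if_number_compare",
--             "wait_for_pixel", "wait_for_multi_pixel", "wait_for_text", "wait_for_number")
--
--
-- def _skip_block(script, j):
--     """Return the index just after the matching end_if of a block already open
--     at position j; any 'else' inside the block is ignored; nested blocks are
--     skipped by recursion. Returns len(script) if the block is unterminated."""
--     while j < len(script):
--         t = script[j]["type"]
--         if t in _OPENERS:
--             j = _skip_block(script, j + 1)
--         elif t == "end_if":
--             return j + 1
--         else:
--             j += 1
--     return j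
--
--
-- def skip_to_else_or_end_if(script, i):
--     j = i + 1
--     while j < len(script):
--         t = script[j]["type"]
--         if t in _OPENERS:
--             j = _skip_block(script, j + 1)
--         elif t == "else" or t == "end_if":
--             return j + 1
--         else:
--             j += 1
--     return j
-- ===== Notes on version B (the rewrite author's own statement) =====
-- stated objective: alternative
-- what changed: Replaces A's single flat loop with a depth counter by a recursive decomposition over the nested block tree: a helper _skip_block recursively returns the index just past a nested block's matching end_if (ignoring any else inside), so the top-level scan keeps no depth state at all.
-- outside the precondition, e.g. on skip_to_else_or_end_if([{'type': 'end_if'}, {}], -1): A returns 1, B returns 1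
import Mathlib
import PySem

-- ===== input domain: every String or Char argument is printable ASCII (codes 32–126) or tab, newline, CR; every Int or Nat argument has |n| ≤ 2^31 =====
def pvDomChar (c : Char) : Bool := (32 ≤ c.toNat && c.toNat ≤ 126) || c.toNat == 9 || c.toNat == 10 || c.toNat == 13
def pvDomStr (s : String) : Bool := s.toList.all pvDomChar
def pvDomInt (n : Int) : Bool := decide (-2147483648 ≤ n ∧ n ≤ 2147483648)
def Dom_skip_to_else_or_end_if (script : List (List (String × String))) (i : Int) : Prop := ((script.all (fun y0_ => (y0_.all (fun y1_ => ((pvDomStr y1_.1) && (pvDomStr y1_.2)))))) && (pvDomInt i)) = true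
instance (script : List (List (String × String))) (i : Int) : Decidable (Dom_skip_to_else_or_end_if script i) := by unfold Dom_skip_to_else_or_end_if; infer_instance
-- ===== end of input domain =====

-- B replaces A's flat depth-counter loop by a recursive decomposition over the
-- nested block tree (a helper skips each nested block recursively); same cost,
-- equal return value on Pre_. No argument is mutated.

-- script[j]["type"]: negative index wraps (pyGet?), dict lookup = first match;
-- "" when the access would raise (such inputs are outside Pre_).
def pvTypeAt (script : List (List (String × String))) (j : Int) : String :=
  ((PySem.List.pyGet? script j).bind (fun d => d.lookup "type")).getD ""

-- ===== PORT A =====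
-- literal port of A's while-loop: state = (depth, i), branches in source order
def pvLoopA (script : List (List (String × String))) (depth : Int) (i : Int) : Int :=
  if h : i < (script.length : Int) then
    if pvTypeAt script i ∈ ["if_pixel", "if_multi_pixel", "if_text_contains",
        "if_number_compare", "wait_for_pixel", "wait_for_multi_pixel",
        "wait_for_text", "wait_for_number"] then
      pvLoopA script (depth + 1) (i + 1)
    else if pvTypeAt script i = "else" ∧ depth = 1 then i + 1
    else if pvTypeAt script i = "end_if" ∧ depth = 1 then i + 1
    else if pvTypeAt script i = "end_if" then pvLoopA script (depth - 1) (i + 1)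
    else pvLoopA script depth (i + 1)
  else i
termination_by ((script.length : Int) - i).toNat
decreasing_by all_goals omega

def skip_to_else_or_end_if (script : List (List (String × String))) (i : Int) : Int :=
  pvLoopA script 1 (i + 1)

-- ===== PORT B =====
def pvOpeners : List String :=
  ["if_pixel", "if_multi_pixel", "if_text_contains", "if_number_compare",
   "wait_for_pixel", "wait_for_multi_pixel", "wait_for_text", "wait_for_number"]

-- _skip_block of Source B; fuel is only a totality guard (always sufficient at call sites)
def pvSkipBlock (script : List (List (String × String))) : Nat → Int → Int
  | 0, j => j
  | f + 1, j =>
    if j < (script.length : Int) then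
      if pvTypeAt script j ∈ pvOpeners then
        pvSkipBlock script f (pvSkipBlock script f (j + 1))
      else if pvTypeAt script j = "end_if" then j + 1
      else pvSkipBlock script f (j + 1)
    else j

-- the top-level scan of Source B
def pvScanB (script : List (List (String × String))) : Nat → Int → Int
  | 0, j => j
  | f + 1, j =>
    if j < (script.length : Int) then
      if pvTypeAt script j ∈ pvOpeners then
        pvScanB script f (pvSkipBlock script f (j + 1))
      else if pvTypeAt script j = "else" ∨ pvTypeAt script j = "end_if" then j + 1
      else pvScanB script f (j + 1)
    else j

def skip_to_else_or_end_if_alt (script : List (List (String × String))) (i : Int) : Int :=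
  pvScanB script (((script.length : Int) - i - 1).toNat + 1) (i + 1)

-- ===== PRECONDITION & SPEC =====
-- Pre_ excludes the inputs where Python A raises: a start index i+1 below -len with
-- the loop entered (IndexError on a wrapped index) or a scanned entry without a
-- "type" key (KeyError); requiring the key of every entry from i+1 on (all entries
-- for a wrapped negative start) also excludes a few inputs where A returns before
-- reaching the keyless entry (see the cite in the claim).
def Pre_skip_to_else_or_end_if (script : List (List (String × String))) (i : Int) : Prop :=
  ((script.length : Int) ≤ i + 1) ∨
  (0 ≤ i + 1 ∧ ∀ d ∈ script.drop (i + 1).toNat, (d.lookup "type").isSome) ∨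
  (-(script.length : Int) ≤ i + 1 ∧ ∀ d ∈ script, (d.lookup "type").isSome)
instance (script : List (List (String × String))) (i : Int) : Decidable (Pre_skip_to_else_or_end_if script i) := by unfold Pre_skip_to_else_or_end_if; infer_instance

def pvWitness_skip_to_else_or_end_if : (List (List (String × String))) × Int :=
  ([[("type", "end_if")], [("type", "click")]], 0)

def Spec_skip_to_else_or_end_if (script : List (List (String × String))) (i : Int) (out : Int) : Prop := out = skip_to_else_or_end_if_alt script i
instance (script : List (List (String × String))) (i : Int) (out : Int) : Decidable (Spec_skip_to_else_or_end_if script i out) := by unfold Spec_skip_to_else_or_end_if; infer_instance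

-- ===== CLAIM (what is proved, stated in full; the proofs are below) =====
def Claim_equal_skip_to_else_or_end_if : Prop := ∀ (script : List (List (String × String))) (i : Int), Dom_skip_to_else_or_end_if script i → Pre_skip_to_else_or_end_if script i → Spec_skip_to_else_or_end_if script i (skip_to_else_or_end_if script i)

-- ===== LEMMAS AND PROOFS =====

-- A's loop returns its index unchanged once the scan is past the end
theorem pvLoopA_stop (script : List (List (String × String))) (d j : Int)
    (hj : ¬ j < (script.length : Int)) : pvLoopA script d j = j := by
  rw [pvLoopA]; simp [hj]

-- the block skipper never moves backwards
theorem pvSkipBlock_le (script : List (List (String × String))) :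
    ∀ (f : Nat) (j : Int), j ≤ pvSkipBlock script f j := by
  intro f
  induction f with
  | zero => intro j; simp [pvSkipBlock]
  | succ f ih =>
    intro j
    rw [pvSkipBlock]
    split_ifs with h1 h2 h3
    · exact le_trans (le_trans (by omega) (ih (j + 1))) (ih _)
    · omega
    · exact le_trans (by omega) (ih (j + 1))
    · exact le_refl j

-- A's loop at depth d+1 (d ≥ 1) = skip the open block, then continue at depth d
theorem pvLoopA_skip (script : List (List (String × String))) :
    ∀ (f : Nat) (d j : Int), 1 ≤ d → (script.length : Int) - j + 1 ≤ (f : Int) →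
      pvLoopA script (d + 1) j = pvLoopA script d (pvSkipBlock script f j) := by
  intro f
  induction f with
  | zero =>
    intro d j _ hf
    have hj : ¬ j < (script.length : Int) := by push_cast at hf ⊢; omega
    simp [pvSkipBlock]
    rw [pvLoopA_stop script (d + 1) j hj, pvLoopA_stop script d j hj]
  | succ f ih =>
    intro d j hd hf
    by_cases hj : j < (script.length : Int)
    · rw [pvSkipBlock, if_pos hj]
      by_cases hop : pvTypeAt script j ∈ pvOpeners
      · -- opener: one level deeper on the left, nested skip on the right
        rw [pvLoopA, dif_pos hj, if_pos (by simpa [pvOpeners] using hop), if_pos hop]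
        have h1 : pvLoopA script (d + 1 + 1) (j + 1)
            = pvLoopA script (d + 1) (pvSkipBlock script f (j + 1)) := by
          apply ih (d + 1) (j + 1) (by omega); push_cast at hf ⊢; omega
        have hle : j + 1 ≤ pvSkipBlock script f (j + 1) := pvSkipBlock_le script f (j + 1)
        have h2 : pvLoopA script (d + 1) (pvSkipBlock script f (j + 1))
            = pvLoopA script d (pvSkipBlock script f (pvSkipBlock script f (j + 1))) := by
          apply ih d _ hd; push_cast at hf ⊢; omega
        rw [h1, h2]
      · by_cases hend : pvTypeAt script j = "end_if"
        · -- end_if at depth ≥ 2: depth-1 on the left, return j+1 on the right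
          rw [pvLoopA, dif_pos hj, if_neg (by simpa [pvOpeners] using hop),
              if_neg (by simp [hend]), if_neg (fun hc => by omega), if_pos hend]
          rw [if_neg hop, if_pos hend]
          norm_num
        · -- else / other instruction: both step to j+1 at unchanged depth
          have helse : ¬ (pvTypeAt script j = "else" ∧ d + 1 = 1) := fun hc => by omega
          rw [pvLoopA, dif_pos hj, if_neg (by simpa [pvOpeners] using hop),
              if_neg helse, if_neg (fun hc => hend hc.1), if_neg hend]
          rw [if_neg hop, if_neg hend]
          apply ih d (j + 1) hd; push_cast at hf ⊢; omega
    · rw [pvSkipBlock, if_neg hj]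
      rw [pvLoopA_stop script (d + 1) j hj, pvLoopA_stop script d j hj]

-- A's loop at depth 1 = B's top-level scan
theorem pvLoopA_scan (script : List (List (String × String))) :
    ∀ (f : Nat) (j : Int), (script.length : Int) - j + 1 ≤ (f : Int) →
      pvLoopA script 1 j = pvScanB script f j := by
  intro f
  induction f with
  | zero =>
    intro j hf
    have hj : ¬ j < (script.length : Int) := by push_cast at hf ⊢; omega
    rw [pvLoopA_stop script 1 j hj]
    simp [pvScanB]
  | succ f ih =>
    intro j hf
    rw [pvScanB]
    by_cases hj : j < (script.length : Int)
    · rw [if_pos hj]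
      by_cases hop : pvTypeAt script j ∈ pvOpeners
      · rw [pvLoopA, dif_pos hj, if_pos (by simpa [pvOpeners] using hop), if_pos hop]
        have h1 : pvLoopA script (1 + 1) (j + 1)
            = pvLoopA script 1 (pvSkipBlock script f (j + 1)) := by
          apply pvLoopA_skip script f 1 (j + 1) (by omega); push_cast at hf ⊢; omega
        have hle : j + 1 ≤ pvSkipBlock script f (j + 1) := pvSkipBlock_le script f (j + 1)
        rw [h1]
        apply ih; push_cast at hf ⊢; omega
      · by_cases hterm : pvTypeAt script j = "else" ∨ pvTypeAt script j = "end_if"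
        · rw [if_neg hop, if_pos hterm]
          rcases hterm with h | h
          · rw [pvLoopA, dif_pos hj, if_neg (by simpa [pvOpeners] using hop),
                if_pos ⟨h, rfl⟩]
          · have hne : pvTypeAt script j ≠ "else" := by rw [h]; decide
            rw [pvLoopA, dif_pos hj, if_neg (by simpa [pvOpeners] using hop),
                if_neg (fun hc => hne hc.1), if_pos ⟨h, rfl⟩]
        · have h1 : pvTypeAt script j ≠ "else" := fun h => hterm (Or.inl h)
          have h2 : pvTypeAt script j ≠ "end_if" := fun h => hterm (Or.inr h)
          rw [if_neg hop, if_neg hterm]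
          rw [pvLoopA, dif_pos hj, if_neg (by simpa [pvOpeners] using hop),
              if_neg (fun hc => h1 hc.1), if_neg (fun hc => h2 hc.1), if_neg h2]
          apply ih; push_cast at hf ⊢; omega
    · rw [if_neg hj, pvLoopA_stop script 1 j hj]

-- ===== VERDICT (by name: the statement is the Claim_ definition above) =====
theorem skip_to_else_or_end_if_spec : Claim_equal_skip_to_else_or_end_if := by
  intro script i _ _
  unfold Spec_skip_to_else_or_end_if skip_to_else_or_end_if skip_to_else_or_end_if_alt
  apply pvLoopA_scan
  push_cast
  omega
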